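-- pv_equiv track=rewrite | github.com/ethosengine/elohim | elohim-app/scripts/add_trust_fields.py | get_effective_reach
-- ===== SOURCE A (Python) =====
-- DEFAULT_REACH = "commons"  # Existing content is public
--
-- REACH_LEVELS = {
--     "private": 0,
--     "invited": 1,
--     "local": 2,
--     "community": 3,
--     "federated": 4,
--     "commons": 5
-- }
--
-- def get_effective_reach(attestations: list) -> str:
--     """Determine effective reach from attestations."""
--     if not attestations:
--         return DEFAULT_REACH
--
--     highest_reach = "private"
--     highest_level = 0
--
--     for att in attestations:
--         if att.get("status") == "active":
--             reach = att.get("reachGranted", "private")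
--             level = REACH_LEVELS.get(reach, 0)
--             if level > highest_level:
--                 highest_level = level
--                 highest_reach = reach
--
--     return highest_reach
-- ===== SOURCE B (Python) =====
-- DEFAULT_REACH = "commons"  # Existing content is public
--
-- REACH_LEVELS = {
--     "private": 0,
--     "invited": 1,
--     "local": 2,
--     "community": 3,
--     "federated": 4,
--     "commons": 5
-- }
--
-- # Known reach names with a positive level, widest first; 'private' (level 0) is the floor.
-- GRANT_ORDER = ["commons", "federated", "community", "local", "invited"]
--
-- def get_effective_reach(attestations: list) -> str:
--     """Determine effective reach from attestations."""
--     if not attestations: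
--         return DEFAULT_REACH
--     granted = {att.get("reachGranted", "private")
--                for att in attestations
--                if att.get("status") == "active"}
--     for name in GRANT_ORDER:
--         if name in granted:
--             return name
--     return "private"
-- ===== Notes on version B (the rewrite author's own statement) =====
-- stated objective: alternative
-- what changed: Instead of A's single pass threading a (highest_reach, highest_level) pair, B builds the set of reaches granted by active attestations and then searches the fixed known-reach table from widest to narrowest, returning the first one present (early exit), defaulting to 'private'.
import Mathlib
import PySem

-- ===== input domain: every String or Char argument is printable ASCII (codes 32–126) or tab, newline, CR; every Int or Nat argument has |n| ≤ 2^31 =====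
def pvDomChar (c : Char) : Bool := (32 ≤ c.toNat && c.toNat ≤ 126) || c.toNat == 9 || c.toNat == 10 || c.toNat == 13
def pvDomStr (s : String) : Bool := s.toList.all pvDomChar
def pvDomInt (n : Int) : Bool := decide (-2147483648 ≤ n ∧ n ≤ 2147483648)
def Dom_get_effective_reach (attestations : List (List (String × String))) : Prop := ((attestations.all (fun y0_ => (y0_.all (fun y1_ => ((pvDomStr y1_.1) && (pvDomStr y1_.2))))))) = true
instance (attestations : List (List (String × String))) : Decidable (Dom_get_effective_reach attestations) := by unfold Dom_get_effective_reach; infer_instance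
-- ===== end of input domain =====

-- B replaces A's single accumulator loop by a set of granted reaches plus an early-exit
-- search of the fixed reach table from widest to narrowest (alternative decomposition).

-- ===== PORT A =====
def pvReachLevels : PySem.Dict String Int :=
  PySem.Dict.mk [("private", 0), ("invited", 1), ("local", 2),
                 ("community", 3), ("federated", 4), ("commons", 5)]

-- A's for-loop over attestations, carrying (highest_reach, highest_level)
def pvLoopA : List (List (String × String)) → String → Int → String
  | [], hr, _ => hr
  | att :: rest, hr, hl =>
    if (PySem.Dict.mk att).get? "status" == some "active" then
      let reach := (PySem.Dict.mk att).getD "reachGranted" "private"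
      let level := pvReachLevels.getD reach 0
      if level > hl then pvLoopA rest reach level else pvLoopA rest hr hl
    else pvLoopA rest hr hl

def get_effective_reach (attestations : List (List (String × String))) : String :=
  if attestations.isEmpty then "commons"
  else pvLoopA attestations "private" 0

-- ===== PORT B =====
-- GRANT_ORDER: the known reaches with positive level, widest first
def pvGrantOrder : List String := ["commons", "federated", "community", "local", "invited"]

def pvIsActive (att : List (String × String)) : Bool :=
  (PySem.Dict.mk att).get? "status" == some "active"

def pvReachOf (att : List (String × String)) : String :=
  (PySem.Dict.mk att).getD "reachGranted" "private"

-- the set comprehension {att.get("reachGranted","private") for active att}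
def pvGranted (attestations : List (List (String × String))) : PySem.Set String :=
  PySem.Set.ofList ((attestations.filter pvIsActive).map pvReachOf)

-- 'for name in GRANT_ORDER: if name in granted: return name' / 'return "private"'
def pvPick : List String → PySem.Set String → String
  | [], _ => "private"
  | n :: rest, g => if PySem.Set.contains g n then n else pvPick rest g

def get_effective_reach_alt (attestations : List (List (String × String))) : String :=
  if attestations.isEmpty then "commons"
  else pvPick pvGrantOrder (pvGranted attestations)

-- ===== PRECONDITION & SPEC =====
def Spec_get_effective_reach (attestations : List (List (String × String))) (out : String) : Prop := out = get_effective_reach_alt attestations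
instance (attestations : List (List (String × String))) (out : String) : Decidable (Spec_get_effective_reach attestations out) := by unfold Spec_get_effective_reach; infer_instance

-- ===== CLAIM =====
def Claim_equal_get_effective_reach : Prop := ∀ (attestations : List (List (String × String))), Dom_get_effective_reach attestations → Spec_get_effective_reach attestations (get_effective_reach attestations)

-- ===== LEMMAS AND PROOFS =====

-- proof-only helper: the level table read backwards (used to characterise both programs)
def pvReachByLevel : PySem.Dict Int String :=
  PySem.Dict.mk [((0 : Int), "private"), (1, "invited"), (2, "local"),
                 (3, "community"), (4, "federated"), (5, "commons")]

def pvLvl (r : String) : Int := pvReachLevels.getD r 0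

def pvLevelOf (att : List (String × String)) : Int := pvLvl (pvReachOf att)

-- every level looked up in REACH_LEVELS (default 0) is one of the table's six cases
lemma pvLvl_cases (r : String) :
    pvLvl r = 0 ∨ (r = "invited" ∧ pvLvl r = 1) ∨ (r = "local" ∧ pvLvl r = 2) ∨
    (r = "community" ∧ pvLvl r = 3) ∨ (r = "federated" ∧ pvLvl r = 4) ∨ (r = "commons" ∧ pvLvl r = 5) := by
  simp only [pvLvl, pvReachLevels, PySem.Dict.getD_eq_get?_getD, PySem.Dict.get?_mk_cons]
  split_ifs <;> simp_all [PySem.Dict.get?, beq_iff_eq]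

lemma pvLvl_nonneg (r : String) : 0 ≤ pvLvl r := by
  rcases pvLvl_cases r with h | ⟨_, h⟩ | ⟨_, h⟩ | ⟨_, h⟩ | ⟨_, h⟩ | ⟨_, h⟩ <;> omega

lemma pvLvl_le_five (r : String) : pvLvl r ≤ 5 := by
  rcases pvLvl_cases r with h | ⟨_, h⟩ | ⟨_, h⟩ | ⟨_, h⟩ | ⟨_, h⟩ | ⟨_, h⟩ <;> omega

-- a strictly positive level determines its reach string through the inverted table
lemma pvRev_of_level (reach : String) (h : 0 < pvLvl reach) :
    pvReachByLevel.getD (pvLvl reach) "private" = reach := by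
  simp only [pvLvl, pvReachLevels, PySem.Dict.getD_eq_get?_getD, PySem.Dict.get?_mk_cons] at *
  split_ifs at * <;>
    simp_all [pvReachByLevel, PySem.Dict.get?, beq_iff_eq]

-- general max-fold facts
lemma pvFoldlMax_le (l : List Int) (a c : Int) (ha : a ≤ c) (h : ∀ x ∈ l, x ≤ c) :
    l.foldl max a ≤ c := by
  induction l generalizing a with
  | nil => exact ha
  | cons x t ih =>
    simp only [List.foldl_cons]
    exact ih _ (max_le ha (h x (by simp))) (fun y hy => h y (by simp [hy]))

lemma pvFoldlMax_attained (l : List Int) (a : Int) :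
    l.foldl max a = a ∨ ∃ x ∈ l, l.foldl max a = x := by
  induction l generalizing a with
  | nil => exact Or.inl rfl
  | cons x t ih =>
    simp only [List.foldl_cons]
    rcases ih (max a x) with h | ⟨y, hy, h⟩
    · rcases max_choice a x with hm | hm
      · exact Or.inl (by rw [h, hm])
      · exact Or.inr ⟨x, by simp, by rw [h, hm]⟩
    · exact Or.inr ⟨y, by simp [hy], h⟩

-- abbreviation for the highest level among a list of reach strings
def pvM (rs : List String) : Int := (rs.map pvLvl).foldl max 0

lemma pvM_nonneg (rs : List String) : 0 ≤ pvM rs :=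
  (PySem.List.le_foldl_max (rs.map pvLvl) 0).1

lemma pvM_le_five (rs : List String) : pvM rs ≤ 5 := by
  refine pvFoldlMax_le _ _ _ (by omega) ?_
  intro x hx
  rcases List.mem_map.mp hx with ⟨r, _, rfl⟩
  exact pvLvl_le_five r

lemma pvLvl_le_pvM (rs : List String) (r : String) (hr : r ∈ rs) : pvLvl r ≤ pvM rs :=
  (PySem.List.le_foldl_max (rs.map pvLvl) 0).2 _ (List.mem_map.mpr ⟨r, hr, rfl⟩)

lemma pvM_attained (rs : List String) (h : 0 < pvM rs) : ∃ r ∈ rs, pvLvl r = pvM rs := by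
  rcases pvFoldlMax_attained (rs.map pvLvl) 0 with h0 | ⟨x, hx, hx'⟩
  · exfalso; rw [pvM] at h; omega
  · rcases List.mem_map.mp hx with ⟨r, hr, rfl⟩
    exact ⟨r, hr, (by rw [pvM, hx'])⟩

-- at a positive level the reach string is unique
lemma pvM_ne_of_absent (rs : List String) (name : String) (hpos : 0 < pvLvl name)
    (huniq : ∀ r : String, pvLvl r = pvLvl name → r = name) (h : name ∉ rs) :
    pvM rs ≠ pvLvl name := by
  intro hM
  rcases pvM_attained rs (by omega) with ⟨r, hr, hlr⟩
  exact h (huniq r (by omega) ▸ hr)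

lemma pvUniq5 : ∀ r : String, pvLvl r = pvLvl "commons" → r = "commons" := by
  intro r h
  have h5 : pvLvl "commons" = 5 := by decide
  rcases pvLvl_cases r with h0 | ⟨rfl, hk⟩ | ⟨rfl, hk⟩ | ⟨rfl, hk⟩ | ⟨rfl, hk⟩ | ⟨rfl, hk⟩ <;>
    first | rfl | omega

lemma pvUniq4 : ∀ r : String, pvLvl r = pvLvl "federated" → r = "federated" := by
  intro r h
  have h4 : pvLvl "federated" = 4 := by decide
  rcases pvLvl_cases r with h0 | ⟨rfl, hk⟩ | ⟨rfl, hk⟩ | ⟨rfl, hk⟩ | ⟨rfl, hk⟩ | ⟨rfl, hk⟩ <;>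
    first | rfl | omega

lemma pvUniq3 : ∀ r : String, pvLvl r = pvLvl "community" → r = "community" := by
  intro r h
  have h3 : pvLvl "community" = 3 := by decide
  rcases pvLvl_cases r with h0 | ⟨rfl, hk⟩ | ⟨rfl, hk⟩ | ⟨rfl, hk⟩ | ⟨rfl, hk⟩ | ⟨rfl, hk⟩ <;>
    first | rfl | omega

lemma pvUniq2 : ∀ r : String, pvLvl r = pvLvl "local" → r = "local" := by
  intro r h
  have h2 : pvLvl "local" = 2 := by decide
  rcases pvLvl_cases r with h0 | ⟨rfl, hk⟩ | ⟨rfl, hk⟩ | ⟨rfl, hk⟩ | ⟨rfl, hk⟩ | ⟨rfl, hk⟩ <;>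
    first | rfl | omega

lemma pvUniq1 : ∀ r : String, pvLvl r = pvLvl "invited" → r = "invited" := by
  intro r h
  have h1 : pvLvl "invited" = 1 := by decide
  rcases pvLvl_cases r with h0 | ⟨rfl, hk⟩ | ⟨rfl, hk⟩ | ⟨rfl, hk⟩ | ⟨rfl, hk⟩ | ⟨rfl, hk⟩ <;>
    first | rfl | omega

-- B's table search equals the inverted-table reading of the maximum level
lemma pvPick_eq (rs : List String) :
    pvPick pvGrantOrder (PySem.Set.ofList rs) = pvReachByLevel.getD (pvM rs) "private" := by
  have hle5 := pvM_le_five rs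
  have h0 := pvM_nonneg rs
  by_cases h5 : "commons" ∈ rs
  · have hge := pvLvl_le_pvM rs _ h5
    have hM : pvM rs = 5 := by
      rw [show pvLvl "commons" = 5 from by decide] at hge; omega
    rw [hM]
    simp [pvPick, pvGrantOrder, h5, pvReachByLevel,
          PySem.Dict.getD_eq_get?_getD, PySem.Dict.get?]
  · have n5 := pvM_ne_of_absent rs "commons" (by decide) pvUniq5 h5
    rw [show pvLvl "commons" = 5 from by decide] at n5
    by_cases h4 : "federated" ∈ rs
    · have hge := pvLvl_le_pvM rs _ h4
      have hM : pvM rs = 4 := by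
        rw [show pvLvl "federated" = 4 from by decide] at hge; omega
      rw [hM]
      simp [pvPick, pvGrantOrder, h5, h4, pvReachByLevel,
            PySem.Dict.getD_eq_get?_getD, PySem.Dict.get?]
    · have n4 := pvM_ne_of_absent rs "federated" (by decide) pvUniq4 h4
      rw [show pvLvl "federated" = 4 from by decide] at n4
      by_cases h3 : "community" ∈ rs
      · have hge := pvLvl_le_pvM rs _ h3
        have hM : pvM rs = 3 := by
          rw [show pvLvl "community" = 3 from by decide] at hge; omega
        rw [hM]
        simp [pvPick, pvGrantOrder, h5, h4, h3, pvReachByLevel,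
              PySem.Dict.getD_eq_get?_getD, PySem.Dict.get?]
      · have n3 := pvM_ne_of_absent rs "community" (by decide) pvUniq3 h3
        rw [show pvLvl "community" = 3 from by decide] at n3
        by_cases h2 : "local" ∈ rs
        · have hge := pvLvl_le_pvM rs _ h2
          have hM : pvM rs = 2 := by
            rw [show pvLvl "local" = 2 from by decide] at hge; omega
          rw [hM]
          simp [pvPick, pvGrantOrder, h5, h4, h3, h2, pvReachByLevel,
                PySem.Dict.getD_eq_get?_getD, PySem.Dict.get?]
        · have n2 := pvM_ne_of_absent rs "local" (by decide) pvUniq2 h2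
          rw [show pvLvl "local" = 2 from by decide] at n2
          by_cases h1 : "invited" ∈ rs
          · have hge := pvLvl_le_pvM rs _ h1
            have hM : pvM rs = 1 := by
              rw [show pvLvl "invited" = 1 from by decide] at hge; omega
            rw [hM]
            simp [pvPick, pvGrantOrder, h5, h4, h3, h2, h1, pvReachByLevel,
                  PySem.Dict.getD_eq_get?_getD, PySem.Dict.get?]
          · have n1 := pvM_ne_of_absent rs "invited" (by decide) pvUniq1 h1
            rw [show pvLvl "invited" = 1 from by decide] at n1
            have hM : pvM rs = 0 := by omega
            rw [hM]
            simp [pvPick, pvGrantOrder, h5, h4, h3, h2, h1, pvReachByLevel,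
                  PySem.Dict.getD_eq_get?_getD, PySem.Dict.get?]

-- loop invariant: A's running pair is (REACH_BY_LEVEL.getD hl "private", hl)
lemma pvLoopA_eq (atts : List (List (String × String))) :
    ∀ (hl : Int), 0 ≤ hl →
      pvLoopA atts (pvReachByLevel.getD hl "private") hl =
        pvReachByLevel.getD (((atts.filter pvIsActive).map pvLevelOf).foldl max hl) "private" := by
  induction atts with
  | nil => intro hl _; rfl
  | cons att rest ih =>
    intro hl h0
    by_cases hact : pvIsActive att
    · simp only [pvLoopA, List.filter_cons, hact, if_pos, List.map_cons, List.foldl_cons]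
      rw [show ((PySem.Dict.mk att).get? "status" == some "active") = true from hact]
      simp only [if_true]
      have hlv : pvLevelOf att = pvLvl (pvReachOf att) := rfl
      by_cases hgt : pvLvl (pvReachOf att) > hl
      · rw [show (PySem.Dict.mk att).getD "reachGranted" "private" = pvReachOf att from rfl]
        rw [if_pos (by simpa [pvLvl] using hgt)]
        have hpos : 0 < pvLvl (pvReachOf att) := lt_of_le_of_lt h0 hgt
        have key := pvRev_of_level (pvReachOf att) hpos
        have step := ih (pvLvl (pvReachOf att)) (pvLvl_nonneg _)
        rw [key] at step
        have hmax : max hl (pvLevelOf att) = pvLevelOf att := by rw [hlv]; omega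
        rw [hmax, hlv]
        simpa [pvLvl] using step
      · rw [show (PySem.Dict.mk att).getD "reachGranted" "private" = pvReachOf att from rfl]
        rw [if_neg (by simpa [pvLvl] using hgt)]
        have hmax : max hl (pvLevelOf att) = hl := by rw [hlv]; omega
        rw [hmax]
        exact ih hl h0
    · have hact' : ((PySem.Dict.mk att).get? "status" == some "active") = false := by
        simpa [pvIsActive] using hact
      simp only [pvLoopA, hact', Bool.false_eq_true, if_false, List.filter_cons]
      rw [show pvIsActive att = false from hact']
      simp only [Bool.false_eq_true, if_false]
      exact ih hl h0

-- ===== VERDICT =====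
theorem get_effective_reach_spec : Claim_equal_get_effective_reach := by
  intro attestations _
  unfold Spec_get_effective_reach get_effective_reach get_effective_reach_alt
  by_cases he : attestations.isEmpty
  · simp [he]
  · simp only [he, Bool.false_eq_true, if_false]
    have hA := pvLoopA_eq attestations 0 le_rfl
    rw [show pvReachByLevel.getD 0 "private" = "private" from by decide] at hA
    have hmap : (attestations.filter pvIsActive).map pvLevelOf =
        ((attestations.filter pvIsActive).map pvReachOf).map pvLvl := by
      rw [List.map_map]; rfl
    have hB := pvPick_eq ((attestations.filter pvIsActive).map pvReachOf)
    rw [pvGranted, hB]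
    unfold pvM
    rw [← hmap]
    exact hA
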